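-- pv_equiv track=rewrite | github.com/noartem/kawaflow | flow-manager/user_activity_logger.py | _contains_sensitive_pattern
-- ===== SOURCE A (Python) =====
-- def _contains_sensitive_pattern(text: str) -> bool:
--     """
--     Check if text contains sensitive patterns.
--
--     Args:
--         text: Text to check
--
--     Returns:
--         True if text contains sensitive patterns
--     """
--     # Simple patterns for common sensitive data
--     sensitive_patterns = [
--         "password=",
--         "token=",
--         "key=",
--         "secret=",
--         "auth=",
--         "Bearer ",
--         "Basic ",
--         "jwt:",
--         "api_key:",
--     ]
--
--     text_lower = text.lower()
--     return any(pattern.lower() in text_lower for pattern in sensitive_patterns)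
-- ===== SOURCE B (Python) =====
-- # Single left-to-right scan with a first-character dispatch table instead of
-- # nine independent full substring scans; same fixed patterns, same lowercasing.
-- _SENSITIVE_BY_FIRST = {
--     "p": ("password=",),
--     "t": ("token=",),
--     "k": ("key=",),
--     "s": ("secret=",),
--     "a": ("auth=", "api_key:"),
--     "b": ("bearer ", "basic "),
--     "j": ("jwt:",),
-- }
--
--
-- def _contains_sensitive_pattern(text: str) -> bool:
--     t = text.lower()
--     for i, c in enumerate(t):
--         for p in _SENSITIVE_BY_FIRST.get(c, ()):
--             if t.startswith(p, i):
--                 return True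
--     return False
-- ===== Notes on version B (the rewrite author's own statement) =====
-- stated objective: alternative
-- what changed: Replaces nine independent whole-text substring scans with one left-to-right pass that, at each position, consults a first-character dispatch table and checks only the (at most two) patterns starting with that character.
import Mathlib
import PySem

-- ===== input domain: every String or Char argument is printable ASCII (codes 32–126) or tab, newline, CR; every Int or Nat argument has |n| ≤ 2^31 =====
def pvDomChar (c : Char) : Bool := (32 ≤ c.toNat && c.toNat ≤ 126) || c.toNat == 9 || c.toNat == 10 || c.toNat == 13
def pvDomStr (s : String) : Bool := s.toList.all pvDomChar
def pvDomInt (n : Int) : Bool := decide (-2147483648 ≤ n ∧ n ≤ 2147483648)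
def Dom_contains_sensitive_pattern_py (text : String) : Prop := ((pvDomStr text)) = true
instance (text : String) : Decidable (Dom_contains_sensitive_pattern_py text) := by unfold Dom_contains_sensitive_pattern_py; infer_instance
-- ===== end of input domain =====

-- B replaces nine whole-text substring scans with one pass dispatching on the first character; same result.

-- ===== PORT A =====
def sensitivePatternsA : List String :=
  ["password=", "token=", "key=", "secret=", "auth=", "Bearer ", "Basic ", "jwt:", "api_key:"]

def contains_sensitive_pattern_py (text : String) : Bool :=
  let text_lower := PySem.Str.lower text
  sensitivePatternsA.any (fun pattern => PySem.Str.isIn (PySem.Str.lower pattern) text_lower)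

-- ===== PORT B =====
-- first-character dispatch table (_SENSITIVE_BY_FIRST.get(c, ()))
def patsByFirst (c : Char) : List (List Char) :=
  if c = 'p' then ["password=".toList]
  else if c = 't' then ["token=".toList]
  else if c = 'k' then ["key=".toList]
  else if c = 's' then ["secret=".toList]
  else if c = 'a' then ["auth=".toList, "api_key:".toList]
  else if c = 'b' then ["bearer ".toList, "basic ".toList]
  else if c = 'j' then ["jwt:".toList]
  else []

-- the 'for i, c in enumerate(t)' loop: recursion over the suffixes of t
-- (t.startswith(p, i) is exactly 'p is a prefix of the suffix at i')
def scanSensitive : List Char → Bool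
  | [] => false
  | c :: rest => (patsByFirst c).any (fun p => p.isPrefixOf (c :: rest)) || scanSensitive rest

def contains_sensitive_pattern_py_alt (text : String) : Bool :=
  scanSensitive (PySem.Str.lower text).toList

-- ===== PRECONDITION & SPEC =====
def Spec_contains_sensitive_pattern_py (text : String) (out : Bool) : Prop := out = contains_sensitive_pattern_py_alt text
instance (text : String) (out : Bool) : Decidable (Spec_contains_sensitive_pattern_py text out) := by unfold Spec_contains_sensitive_pattern_py; infer_instance

-- ===== CLAIM (what is proved, stated in full; the proofs are below) =====
def Claim_equal_contains_sensitive_pattern_py : Prop := ∀ (text : String), Dom_contains_sensitive_pattern_py text → Spec_contains_sensitive_pattern_py text (contains_sensitive_pattern_py text)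

-- ===== LEMMAS AND PROOFS =====

-- the nine patterns, lowercased, as char lists
def lowPats : List (List Char) :=
  ["password=".toList, "token=".toList, "key=".toList, "secret=".toList,
   "auth=".toList, "bearer ".toList, "basic ".toList, "jwt:".toList, "api_key:".toList]

lemma dispatch_eq (c : Char) (rest : List Char) :
    (patsByFirst c).any (fun p => p.isPrefixOf (c :: rest)) =
      lowPats.any (fun p => p.isPrefixOf (c :: rest)) := by
  unfold patsByFirst
  split_ifs with h1 h2 h3 h4 h5 h6 h7
  case pos => subst_vars; simp [lowPats, List.isPrefixOf]
  case pos => subst_vars; simp [lowPats, List.isPrefixOf]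
  case pos => subst_vars; simp [lowPats, List.isPrefixOf]
  case pos => subst_vars; simp [lowPats, List.isPrefixOf]
  case pos => subst_vars; simp [lowPats, List.isPrefixOf]
  case pos => subst_vars; simp [lowPats, List.isPrefixOf]
  case pos => subst_vars; simp [lowPats, List.isPrefixOf]
  case neg =>
    simp [lowPats, List.isPrefixOf]
    exact ⟨fun h => absurd h.symm h1, fun h => absurd h.symm h2, fun h => absurd h.symm h3,
      fun h => absurd h.symm h4, fun h => absurd h.symm h5, fun h => absurd h.symm h6,
      fun h => absurd h.symm h6, fun h => absurd h.symm h7, fun h => absurd h.symm h5⟩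

lemma scan_iff (t : List Char) :
    scanSensitive t = true ↔ ∃ p ∈ lowPats, p <:+: t := by
  induction t with
  | nil => simp [scanSensitive, lowPats]
  | cons c rest ih =>
    rw [scanSensitive, dispatch_eq, Bool.or_eq_true, ih]
    simp only [List.any_eq_true, List.isPrefixOf_iff_prefix]
    constructor
    · rintro (⟨p, hp, hpre⟩ | ⟨p, hp, hinf⟩)
      · exact ⟨p, hp, hpre.isInfix⟩
      · exact ⟨p, hp, hinf.trans (List.suffix_cons c rest).isInfix⟩
    · rintro ⟨p, hp, hinf⟩
      rcases List.infix_cons_iff.mp hinf with h | h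
      · exact Or.inl ⟨p, hp, h⟩
      · exact Or.inr ⟨p, hp, h⟩

lemma a_iff (text : String) :
    contains_sensitive_pattern_py text = true ↔
      ∃ p ∈ lowPats, p <:+: (PySem.Str.lower text).toList := by
  have e1 : PySem.Str.lower "password=" = "password=" := by decide
  have e2 : PySem.Str.lower "token=" = "token=" := by decide
  have e3 : PySem.Str.lower "key=" = "key=" := by decide
  have e4 : PySem.Str.lower "secret=" = "secret=" := by decide
  have e5 : PySem.Str.lower "auth=" = "auth=" := by decide
  have e6 : PySem.Str.lower "Bearer " = "bearer " := by decide
  have e7 : PySem.Str.lower "Basic " = "basic " := by decide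
  have e8 : PySem.Str.lower "jwt:" = "jwt:" := by decide
  have e9 : PySem.Str.lower "api_key:" = "api_key:" := by decide
  simp only [contains_sensitive_pattern_py, sensitivePatternsA, lowPats,
    List.any_cons, List.any_nil, Bool.or_eq_true, Bool.false_eq_true, or_false,
    e1, e2, e3, e4, e5, e6, e7, e8, e9, PySem.Str.isIn_iff_infix,
    List.exists_mem_cons_iff, List.not_mem_nil, false_and, exists_false]

-- ===== VERDICT (by name: the statement is the Claim_ definition above) =====
theorem contains_sensitive_pattern_py_spec : Claim_equal_contains_sensitive_pattern_py := by
  intro text _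
  unfold Spec_contains_sensitive_pattern_py contains_sensitive_pattern_py_alt
  rw [Bool.eq_iff_iff, a_iff, scan_iff]
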